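-- pv_equiv track=rewrite | github.com/Noble14/aoc | 2023/day13/second.py | line_sym
-- ===== SOURCE A (Python) =====
-- def line_sym(line, i, diff):
--     j = 1
--     end = min(len(line)-i, i)+1
--     while j < end  and diff < 2:
--         if line[i-j] != line[i+j-1]:
--             diff += 1
--         j += 1
--     return diff
-- ===== SOURCE B (Python) =====
-- def line_sym(line, i, diff):
--     k = max(0, min(i, len(line) - i))
--     left = line[i-k:i][::-1]
--     right = line[i:i+k]
--     m = sum(a != b for a, b in zip(left, right))
--     return diff if diff >= 2 else min(diff + m, 2)
-- ===== Notes on version B (the rewrite author's own statement) =====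
-- stated objective: simpler
-- what changed: Replaces the stateful while-loop with early exit by a closed-form decomposition: clamp k = max(0, min(i, len-i)), take the reversed left slice and the right slice, count all mismatches in one zip pass, and clamp the result with min(diff+m, 2).
import Mathlib
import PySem

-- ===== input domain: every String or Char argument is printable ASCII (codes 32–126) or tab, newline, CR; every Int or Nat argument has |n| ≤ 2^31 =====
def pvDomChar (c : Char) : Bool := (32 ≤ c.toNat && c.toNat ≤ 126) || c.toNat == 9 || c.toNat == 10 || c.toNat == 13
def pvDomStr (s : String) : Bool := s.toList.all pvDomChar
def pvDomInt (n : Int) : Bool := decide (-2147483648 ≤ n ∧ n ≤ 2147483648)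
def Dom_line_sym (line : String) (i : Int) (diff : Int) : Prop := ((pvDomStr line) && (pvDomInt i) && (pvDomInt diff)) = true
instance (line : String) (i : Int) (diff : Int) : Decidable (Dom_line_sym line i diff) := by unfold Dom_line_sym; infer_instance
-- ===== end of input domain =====

-- B replaces A's early-exit while-loop by slicing, one full zip mismatch count and a clamp (objective: simpler).

-- ===== PORT A =====
-- The while loop, step for step: state (j, diff); compares line[i-j] with line[i+j-1].
-- Whenever the comparison is reached both indices are in range (1 ≤ j < end ≤ min(i, len-i)+1),
-- so comparing the two `pyGet?` Options is exact: both are always `some` there.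
def lineSymLoopA (cs : List Char) (i e j d : Int) : Int :=
  if _h : j < e ∧ d < 2 then
    lineSymLoopA cs i e (j + 1)
      (if PySem.List.pyGet? cs (i - j) ≠ PySem.List.pyGet? cs (i + j - 1) then d + 1 else d)
  else d
termination_by (e - j).toNat
decreasing_by omega

def line_sym (line : String) (i : Int) (diff : Int) : Int :=
  lineSymLoopA line.toList i (min ((line.toList.length : Int) - i) i + 1) 1 diff

-- ===== PORT B =====
-- k = max(0, min(i, len-i)); left = line[i-k:i][::-1]; right = line[i:i+k];
-- m = sum(a != b for a, b in zip(left, right)); return diff if diff >= 2 else min(diff+m, 2).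
-- ([::-1] is ported as .reverse, exact by PySem.List.slice?_none_none_neg_one.)
def line_sym_alt (line : String) (i : Int) (diff : Int) : Int :=
  let cs := line.toList
  let k : Int := max 0 (min i ((cs.length : Int) - i))
  let left := (PySem.List.slice cs (some (i - k)) (some i)).reverse
  let right := PySem.List.slice cs (some i) (some (i + k))
  let m : Int := ((left.zip right).map (fun p => if p.1 ≠ p.2 then (1 : Int) else 0)).sum
  if diff ≥ 2 then diff else min (diff + m) 2

-- ===== PRECONDITION & SPEC =====
def Spec_line_sym (line : String) (i : Int) (diff : Int) (out : Int) : Prop := out = line_sym_alt line i diff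
instance (line : String) (i : Int) (diff : Int) (out : Int) : Decidable (Spec_line_sym line i diff out) := by unfold Spec_line_sym; infer_instance

-- ===== CLAIM (what is proved, stated in full; the proofs are below) =====
def Claim_equal_line_sym : Prop := ∀ (line : String) (i : Int) (diff : Int), Dom_line_sym line i diff → Spec_line_sym line i diff (line_sym line i diff)

-- ===== LEMMAS AND PROOFS =====

-- the list of (Option-indexed) comparison pairs A still has to perform at loop counter j
def pairsFrom (cs : List Char) (i j e : Int) : List (Option Char × Option Char) :=
  (PySem.List.pyRange j e 1).map (fun t => (PySem.List.pyGet? cs (i - t), PySem.List.pyGet? cs (i + t - 1)))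

def mcount (L : List (Option Char × Option Char)) : Int :=
  (L.map (fun p => if p.1 ≠ p.2 then (1 : Int) else 0)).sum

theorem mcount_nonneg (L : List (Option Char × Option Char)) : 0 ≤ mcount L := by
  induction L with
  | nil => simp [mcount]
  | cons p L ih =>
    simp only [mcount, List.map_cons, List.sum_cons] at *
    split <;> omega

theorem mcount_cons (p : Option Char × Option Char) (L : List (Option Char × Option Char)) :
    mcount (p :: L) = (if p.1 ≠ p.2 then (1 : Int) else 0) + mcount L := by
  simp [mcount]

-- characterisation of A's loop: count everything, clamp at 2
theorem lineSymLoopA_eq (cs : List Char) (i e j d : Int) :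
    lineSymLoopA cs i e j d = if d < 2 then min (d + mcount (pairsFrom cs i j e)) 2 else d := by
  fun_induction lineSymLoopA cs i e j d with
  | case1 j d h ih =>
    obtain ⟨hje, hd2⟩ := h
    simp only [dite_eq_ite] at ih
    rw [ih]
    have hp : pairsFrom cs i j e =
        (PySem.List.pyGet? cs (i - j), PySem.List.pyGet? cs (i + j - 1)) :: pairsFrom cs i (j + 1) e := by
      unfold pairsFrom
      rw [PySem.List.pyRange_one_cons hje]
      simp [sub_eq_add_neg]
    rw [hp, mcount_cons]
    have hnn := mcount_nonneg (pairsFrom cs i (j + 1) e)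
    by_cases hne : PySem.List.pyGet? cs (i - j) ≠ PySem.List.pyGet? cs (i + j - 1) <;>
      simp only [hne, if_neg, not_false_iff] <;>
      split_ifs <;> omega
  | case2 j d h =>
    rw [not_and_or] at h
    rcases h with h | h
    · have hje : e ≤ j := by omega
      unfold pairsFrom
      rw [PySem.List.pyRange_one_eq_nil hje]
      simp [mcount]
      omega
    · have : ¬ d < 2 := h
      simp [this]

-- B's zip-sum equals A's pair count (bridging slices/reverse/zip to pairsFrom)
theorem altSum (cs : List Char) (i : Int) :
    ((((PySem.List.slice cs (some (i - max 0 (min i ((cs.length : Int) - i)))) (some i)).reverse).zip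
        (PySem.List.slice cs (some i) (some (i + max 0 (min i ((cs.length : Int) - i)))))).map
          (fun p => if p.1 ≠ p.2 then (1 : Int) else 0)).sum
      = mcount (pairsFrom cs i 1 (min ((cs.length : Int) - i) i + 1)) := by
  by_cases hk : min i ((cs.length : Int) - i) ≤ 0
  · have hmax : max 0 (min i ((cs.length : Int) - i)) = 0 := by omega
    have hleft : PySem.List.slice cs (some (i - 0)) (some i) = [] := by
      apply List.eq_nil_of_length_eq_zero
      rw [sub_zero, PySem.List.length_slice]
      omega
    have he : min ((cs.length : Int) - i) i + 1 ≤ 1 := by omega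
    rw [hmax, hleft]
    unfold pairsFrom
    rw [PySem.List.pyRange_one_eq_nil he]
    simp [mcount]
  · have hk : 0 < min i ((cs.length : Int) - i) := by omega
    set k : Int := min i ((cs.length : Int) - i) with hkdef
    have hmax : max 0 k = k := by omega
    have hki : k ≤ i := by omega
    have hil : i ≤ (cs.length : Int) := by omega
    have h0i : 0 < i := by omega
    rw [hmax]
    set kN := k.toNat with hkN
    set iN := i.toNat with hiN
    have hkNle : kN ≤ iN := by omega
    have hiNle : iN ≤ cs.length := by omega
    have hkNr : iN + kN ≤ cs.length := by omega
    have hleft : PySem.List.slice cs (some (i - k)) (some i) = (cs.drop (iN - kN)).take kN := by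
      rw [PySem.List.slice_toNat _ (by omega) (by omega)]
      have e1 : (i - k).toNat = iN - kN := by omega
      rw [e1]
      have e2 : iN - (iN - kN) = kN := by omega
      rw [e2]
    have hright : PySem.List.slice cs (some i) (some (i + k)) = (cs.drop iN).take kN := by
      rw [PySem.List.slice_toNat _ (by omega) (by omega)]
      have e1 : (i + k).toNat = iN + kN := by omega
      rw [e1]
      have e2 : iN + kN - iN = kN := by omega
      rw [e2]
    rw [hleft, hright]
    have hlen1 : (((cs.drop (iN - kN)).take kN).reverse).length = kN := by
      simp; omega
    have hlen2 : ((cs.drop iN).take kN).length = kN := by simp; omega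
    have hzip : (((cs.drop (iN - kN)).take kN).reverse).zip ((cs.drop iN).take kN)
        = (List.range kN).map (fun t => (cs.getD (iN - 1 - t) ' ', cs.getD (iN + t) ' ')) := by
      apply List.ext_getElem
      · simp; omega
      · intro t h1 h2
        have htk : t < kN := by simpa [hlen1, hlen2] using h1
        rw [List.getElem_zip, List.getElem_map]
        have e1 : (((cs.drop (iN - kN)).take kN).reverse)[t]'(by omega) = cs[iN - 1 - t]'(by omega) := by
          rw [List.getElem_reverse]
          rw [List.getElem_take, List.getElem_drop]
          congr 1
          simp [hlen1] at *
          omega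
        have e2 : ((cs.drop iN).take kN)[t]'(by omega) = cs[iN + t]'(by omega) := by
          rw [List.getElem_take, List.getElem_drop]
        rw [e1, e2, List.getElem_range]
        rw [List.getD_eq_getElem cs ' ' (by omega), List.getD_eq_getElem cs ' ' (by omega)]
    rw [hzip, List.map_map]
    -- pairsFrom side
    have he : min ((cs.length : Int) - i) i + 1 = k + 1 := by omega
    unfold pairsFrom mcount
    rw [he, PySem.List.pyRange_one, List.map_map, List.map_map]
    have hsub : (k + 1 - 1).toNat = kN := by omega
    rw [hsub]
    congr 1
    apply List.map_congr_left
    intro t ht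
    have htk : t < kN := List.mem_range.mp ht
    simp only [Function.comp_apply]
    have g1 : PySem.List.pyGet? cs (i - (1 + (t:Int))) = cs[iN - 1 - t]? := by
      have e : i - (1 + (t:Int)) = ((iN - 1 - t : Nat) : Int) := by omega
      rw [e, PySem.List.pyGet?_natCast]
    have g2 : PySem.List.pyGet? cs (i + (1 + (t:Int)) - 1) = cs[iN + t]? := by
      have e : i + (1 + (t:Int)) - 1 = ((iN + t : Nat) : Int) := by omega
      rw [e, PySem.List.pyGet?_natCast]
    rw [g1, g2, List.getElem?_eq_getElem (by omega), List.getElem?_eq_getElem (by omega),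
        List.getD_eq_getElem cs ' ' (by omega), List.getD_eq_getElem cs ' ' (by omega)]
    simp only [ne_eq, Option.some.injEq]

-- B's value, written through mcount/pairsFrom
theorem alt_char (line : String) (i diff : Int) :
    line_sym_alt line i diff =
      if diff < 2 then
        min (diff + mcount (pairsFrom line.toList i 1 (min ((line.toList.length : Int) - i) i + 1))) 2
      else diff := by
  show (if diff ≥ 2 then diff else
      min (diff +
        ((((PySem.List.slice line.toList (some (i - max 0 (min i ((line.toList.length : Int) - i)))) (some i)).reverse).zip
            (PySem.List.slice line.toList (some i) (some (i + max 0 (min i ((line.toList.length : Int) - i)))))).map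
              (fun p => if p.1 ≠ p.2 then (1 : Int) else 0)).sum) 2) = _
  rw [altSum line.toList i]
  split_ifs <;> omega

theorem line_sym_spec : Claim_equal_line_sym := by
  intro line i diff _
  unfold Spec_line_sym line_sym
  rw [lineSymLoopA_eq, alt_char]
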